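-- pv_equiv track=rewrite | github.com/FaysalMehrab/Hacker_Rank_python_Basics | maximize_it.py | maximize_it
-- ===== SOURCE A (Python) =====
-- from itertools import product
--
-- def maximize_it(list_item, m):
--
--     output = 0
--
--     for items in product(*list_item):
--         temp = 0
--
--         for item in items:
--             temp += item ** 2
--
--         temp = temp % m
--
--         if temp > output:
--
--             output = temp
--
--     return output
-- ===== SOURCE B (Python) =====
-- def maximize_it(list_item, m):
--     # DP over reachable residues mod m: combine lists one at a time.
--     residues = {0}
--     for lst in list_item:
--         residues = {(r + x * x) % m for r in residues for x in lst}
--     best = 0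
--     for r in residues:
--         if r > best:
--             best = r
--     return best
-- ===== Notes on version B (the rewrite author's own statement) =====
-- stated objective: faster
-- what changed: Replaces the exhaustive scan of the whole Cartesian product with a dynamic program over the set of reachable sum-of-squares residues mod m, combining one list at a time.
-- outside the precondition, e.g. on maximize_it([[0, -7500, 88], []], 0): A returns 0, B raises ZeroDivisionError
import Mathlib
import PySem

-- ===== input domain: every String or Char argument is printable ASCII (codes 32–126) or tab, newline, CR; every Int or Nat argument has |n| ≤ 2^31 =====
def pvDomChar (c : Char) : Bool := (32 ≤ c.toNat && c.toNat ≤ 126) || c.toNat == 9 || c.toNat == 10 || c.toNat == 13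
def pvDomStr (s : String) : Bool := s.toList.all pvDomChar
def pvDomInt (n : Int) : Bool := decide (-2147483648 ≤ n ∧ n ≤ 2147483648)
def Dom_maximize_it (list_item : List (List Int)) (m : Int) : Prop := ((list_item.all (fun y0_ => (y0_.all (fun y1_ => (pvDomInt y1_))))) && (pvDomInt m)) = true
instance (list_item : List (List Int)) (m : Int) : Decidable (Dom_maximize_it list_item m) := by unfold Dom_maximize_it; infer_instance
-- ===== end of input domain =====

-- B replaces A's scan of the whole Cartesian product by a DP over reachable residues mod m (asymptotically faster).

-- ===== PORT A =====
-- itertools.product(*list_item), first list varying slowest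
def pvProd : List (List Int) → List (List Int)
  | [] => [[]]
  | l :: ls => l.flatMap (fun x => (pvProd ls).map (fun t => x :: t))

def maximize_it (list_item : List (List Int)) (m : Int) : Int :=
  (pvProd list_item).foldl (fun output items =>
    let temp := items.foldl (fun temp item => temp + item ^ 2) 0
    let temp := PySem.Int.mod temp m
    if temp > output then temp else output) 0

-- ===== PORT B =====
def maximize_it_alt (list_item : List (List Int)) (m : Int) : Int :=
  let residues : PySem.Set Int := list_item.foldl
    (fun res lst => PySem.Set.ofList
      (res.flatMap (fun r => lst.map (fun x => PySem.Int.mod (r + x * x) m))))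
    (PySem.Set.ofList [0])
  residues.foldl (fun best r => if r > best then r else best) 0

-- ===== PRECONDITION & SPEC =====
-- Pre_ excludes m = 0, where '% m' raises ZeroDivisionError (in A whenever the product is non-empty; B always evaluates it), so neither program reliably returns there.
def Pre_maximize_it (list_item : List (List Int)) (m : Int) : Prop := m ≠ 0
instance (list_item : List (List Int)) (m : Int) : Decidable (Pre_maximize_it list_item m) := by unfold Pre_maximize_it; infer_instance
def pvWitness_maximize_it : List (List Int) × Int := ([[1, 2], [3]], 5)

def Spec_maximize_it (list_item : List (List Int)) (m : Int) (out : Int) : Prop := out = maximize_it_alt list_item m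
instance (list_item : List (List Int)) (m : Int) (out : Int) : Decidable (Spec_maximize_it list_item m out) := by unfold Spec_maximize_it; infer_instance

-- ===== CLAIM (what is proved, stated in full; the proofs are below) =====
def Claim_equal_maximize_it : Prop := ∀ (list_item : List (List Int)) (m : Int), Dom_maximize_it list_item m → Pre_maximize_it list_item m → Spec_maximize_it list_item m (maximize_it list_item m)

-- ===== LEMMAS AND PROOFS =====

-- sum of squares of a tuple
def pvS (ts : List Int) : Int := (ts.map (fun i => i ^ 2)).sum

-- residue of a tuple continued from an already-reduced accumulator r
def pvRed (m r : Int) (ts : List Int) : Int :=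
  if ts = [] then r else PySem.Int.mod (r + pvS ts) m

theorem pvmod_eq_fmod (a b : Int) : PySem.Int.mod a b = Int.fmod a b := rfl

theorem pvmod_compose (m a b : Int) :
    PySem.Int.mod (PySem.Int.mod a m + b) m = PySem.Int.mod (a + b) m := by
  rw [pvmod_eq_fmod, pvmod_eq_fmod, pvmod_eq_fmod]
  conv_rhs => rw [← Int.fmod_add_mul_fdiv a m]
  rw [show Int.fmod a m + m * Int.fdiv a m + b = Int.fmod a m + b + Int.fdiv a m * m by ring]
  rw [Int.add_mul_fmod_self_right]

theorem pvRed_mod (m a : Int) (ts : List Int) :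
    pvRed m (PySem.Int.mod a m) ts = PySem.Int.mod (a + pvS ts) m := by
  cases ts with
  | nil => simp [pvRed, pvS]
  | cons x ts => simp only [pvRed, if_neg (List.cons_ne_nil x ts), pvmod_compose]

theorem pv_dp_mem (m : Int) (ls : List (List Int)) :
    ∀ (res : List Int) (y : Int),
      (y ∈ ls.foldl
        (fun res lst => PySem.Set.ofList
          (res.flatMap (fun r => lst.map (fun x => PySem.Int.mod (r + x * x) m)))) res
        ↔ ∃ r ∈ res, ∃ ts ∈ pvProd ls, y = pvRed m r ts) := by
  induction ls with
  | nil =>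
      intro res y
      simp [pvProd, pvRed]
  | cons l ls ih =>
      intro res y
      rw [List.foldl_cons, ih]
      constructor
      · rintro ⟨r', hr', ts, hts, rfl⟩
        simp only [PySem.Set.mem_ofList, List.mem_flatMap, List.mem_map] at hr'
        obtain ⟨r, hr, x, hx, rfl⟩ := hr'
        refine ⟨r, hr, x :: ts, ?_, ?_⟩
        · simp only [pvProd, List.mem_flatMap, List.mem_map]
          exact ⟨x, hx, ts, hts, rfl⟩
        · rw [pvRed_mod]
          simp only [pvRed, if_neg (List.cons_ne_nil x ts), pvS, List.map_cons, List.sum_cons]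
          ring_nf
      · rintro ⟨r, hr, ts', hts', rfl⟩
        simp only [pvProd, List.mem_flatMap, List.mem_map] at hts'
        obtain ⟨x, hx, ts, hts, rfl⟩ := hts'
        refine ⟨PySem.Int.mod (r + x * x) m, ?_, ts, hts, ?_⟩
        · simp only [PySem.Set.mem_ofList, List.mem_flatMap, List.mem_map]
          exact ⟨r, hr, x, hx, rfl⟩
        · rw [pvRed_mod]
          simp only [pvRed, if_neg (List.cons_ne_nil x ts), pvS, List.map_cons, List.sum_cons]
          ring_nf

theorem pv_ifmax_foldl (l : List Int) (a : Int) :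
    l.foldl (fun o t => if t > o then t else o) a = l.foldl max a := by
  apply PySem.List.foldl_congr_mem
  intro acc x _
  rw [Int.max_def]; split_ifs <;> omega

theorem pv_foldl_max_eq_of_mem_iff (l1 l2 : List Int)
    (h : ∀ y, y ∈ l1 ↔ y ∈ l2) : l1.foldl max 0 = l2.foldl max 0 := by
  apply le_antisymm
  · rcases PySem.List.foldl_max_mem l1 0 with h0 | hm
    · rw [h0]; exact (PySem.List.le_foldl_max l2 0).1
    · exact (PySem.List.le_foldl_max l2 0).2 _ ((h _).1 hm)
  · rcases PySem.List.foldl_max_mem l2 0 with h0 | hm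
    · rw [h0]; exact (PySem.List.le_foldl_max l1 0).1
    · exact (PySem.List.le_foldl_max l1 0).2 _ ((h _).2 hm)

theorem pvA_eq (list_item : List (List Int)) (m : Int) :
    maximize_it list_item m = ((pvProd list_item).map (pvRed m 0)).foldl max 0 := by
  unfold maximize_it
  rw [List.foldl_map]
  apply PySem.List.foldl_congr_mem
  intro acc ts _
  have hsum : ts.foldl (fun temp item => temp + item ^ 2) 0 = pvS ts := by
    rw [PySem.List.foldl_add]; simp [pvS]
  show (if PySem.Int.mod (ts.foldl (fun temp item => temp + item ^ 2) 0) m > acc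
          then PySem.Int.mod (ts.foldl (fun temp item => temp + item ^ 2) 0) m else acc)
        = max acc (pvRed m 0 ts)
  rw [hsum]
  have hred : PySem.Int.mod (pvS ts) m = pvRed m 0 ts := by
    cases ts with
    | nil => simp [pvRed, pvS, pvmod_eq_fmod]
    | cons x ts => simp [pvRed]
  rw [hred, Int.max_def]
  split_ifs <;> omega

-- ===== VERDICT (by name: the statement is the Claim_ definition above) =====
theorem maximize_it_spec : Claim_equal_maximize_it := by
  intro list_item m _ _
  unfold Spec_maximize_it maximize_it_alt
  rw [pvA_eq, pv_ifmax_foldl]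
  apply pv_foldl_max_eq_of_mem_iff
  intro y
  rw [pv_dp_mem m list_item (PySem.Set.ofList [0]) y]
  simp [PySem.Set.mem_ofList, eq_comm]
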